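-- pv_equiv track=rewrite | github.com/geekforbrains/operator | src/operator_ai/context.py | _group_exchanges
-- ===== SOURCE A (Python) =====
-- from typing import Any
--
-- def _group_exchanges(messages: list[dict[str, Any]], start_idx: int) -> list[list[int]]:
--     """Group messages into exchange groups starting at each user message."""
--     groups: list[list[int]] = []
--     current: list[int] = []
--     for idx in range(start_idx, len(messages)):
--         if messages[idx].get("role") == "user" and current:
--             groups.append(current)
--             current = []
--         current.append(idx)
--     if current:
--         groups.append(current)
--     return groups
-- ===== SOURCE B (Python) =====
-- def _group_exchanges(messages: list, start_idx: int) -> list: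
--     """Group messages into exchange groups starting at each user message."""
--     n = len(messages)
--     if start_idx >= n:
--         return []
--     bounds = [start_idx] + [i for i in range(start_idx + 1, n)
--                             if messages[i].get("role") == "user"]
--     ends = bounds[1:] + [n]
--     return [list(range(a, b)) for a, b in zip(bounds, ends)]
-- ===== Notes on version B (the rewrite author's own statement) =====
-- stated objective: alternative
-- what changed: B replaces A's single accumulator loop (groups/current state mutated per index) with a two-pass boundary-table structure: first collect the user-message boundary indices, then emit each half-open boundary range as a group.
import Mathlib
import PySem

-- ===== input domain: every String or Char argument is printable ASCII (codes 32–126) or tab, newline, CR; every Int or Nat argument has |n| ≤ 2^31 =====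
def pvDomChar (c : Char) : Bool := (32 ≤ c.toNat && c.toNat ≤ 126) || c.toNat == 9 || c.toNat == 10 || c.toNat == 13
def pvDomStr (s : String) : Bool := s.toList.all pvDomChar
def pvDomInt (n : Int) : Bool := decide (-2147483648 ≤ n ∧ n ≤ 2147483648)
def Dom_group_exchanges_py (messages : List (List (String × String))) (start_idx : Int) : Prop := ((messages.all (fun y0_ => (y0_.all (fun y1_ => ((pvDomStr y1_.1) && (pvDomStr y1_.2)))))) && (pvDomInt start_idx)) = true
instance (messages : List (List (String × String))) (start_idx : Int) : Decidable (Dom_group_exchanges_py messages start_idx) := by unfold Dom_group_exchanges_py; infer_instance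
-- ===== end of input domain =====

-- B groups indices by a boundary table (collect user-message boundary indices, then emit each
-- half-open boundary range) instead of A's accumulator loop; alternative decomposition, same cost.

-- ===== PORT A =====
-- messages[idx].get("role") == "user"; the `none` branch (IndexError in Python) is excluded by Pre_
def pvIsUserAt (messages : List (List (String × String))) (idx : Int) : Bool :=
  match PySem.List.pyGet? messages idx with
  | some m => (PySem.Dict.mk m).get? "role" == some "user"
  | none => false

-- the body of A's for-loop over state (groups, current)
def pvStepA (messages : List (List (String × String))) (st : List (List Int) × List Int)
    (idx : Int) : List (List Int) × List Int :=
  let st := if pvIsUserAt messages idx && !st.2.isEmpty then (st.1 ++ [st.2], ([] : List Int)) else st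
  (st.1, st.2 ++ [idx])

def group_exchanges_py (messages : List (List (String × String))) (start_idx : Int) : List (List Int) :=
  let st := (PySem.List.pyRange start_idx (messages.length : Int) 1).foldl (pvStepA messages) ([], [])
  if st.2.isEmpty then st.1 else st.1 ++ [st.2]

-- ===== PORT B =====
def group_exchanges_py_alt (messages : List (List (String × String))) (start_idx : Int) : List (List Int) :=
  let n : Int := messages.length
  if start_idx ≥ n then []
  else
    let bounds := start_idx :: (PySem.List.pyRange (start_idx + 1) n 1).filter (fun i => pvIsUserAt messages i)
    let ends := bounds.tail ++ [n]
    (bounds.zip ends).map (fun ab => PySem.List.pyRange ab.1 ab.2 1)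

-- ===== PRECONDITION & SPEC =====
-- Pre_ excludes exactly the inputs where Python A raises IndexError: start_idx below
-- -len(messages) makes A's very first subscript messages[start_idx] out of range.
def Pre_group_exchanges_py (messages : List (List (String × String))) (start_idx : Int) : Prop :=
  -(messages.length : Int) ≤ start_idx
instance (messages : List (List (String × String))) (start_idx : Int) : Decidable (Pre_group_exchanges_py messages start_idx) := by unfold Pre_group_exchanges_py; infer_instance

def pvWitness_group_exchanges_py : (List (List (String × String))) × Int :=
  ([[("role", "user")], [("role", "assistant")], [("role", "user")]], 0)

def Spec_group_exchanges_py (messages : List (List (String × String))) (start_idx : Int) (out : List (List Int)) : Prop := out = group_exchanges_py_alt messages start_idx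
instance (messages : List (List (String × String))) (start_idx : Int) (out : List (List Int)) : Decidable (Spec_group_exchanges_py messages start_idx out) := by unfold Spec_group_exchanges_py; infer_instance

-- ===== CLAIM (what is proved, stated in full; the proofs are below) =====
def Claim_equal_group_exchanges_py : Prop := ∀ (messages : List (List (String × String))) (start_idx : Int), Dom_group_exchanges_py messages start_idx → Pre_group_exchanges_py messages start_idx → Spec_group_exchanges_py messages start_idx (group_exchanges_py messages start_idx)

-- ===== LEMMAS AND PROOFS =====

-- canonical recursive grouping: cur is the group under construction, a the next index, n the end
def pvGAux (p : Int → Bool) (cur : List Int) (a n : Int) : List (List Int) :=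
  if h : a < n then
    if p a then cur :: pvGAux p [a] (a + 1) n else pvGAux p (cur ++ [a]) (a + 1) n
  else [cur]
termination_by (n - a).toNat
decreasing_by all_goals omega

-- A's final "if current: groups.append(current)" step
def pvFin (st : List (List Int) × List Int) : List (List Int) :=
  if st.2.isEmpty then st.1 else st.1 ++ [st.2]

theorem pvStepA_eq (messages : List (List (String × String))) (st : List (List Int) × List Int)
    (idx : Int) :
    pvStepA messages st idx =
      if pvIsUserAt messages idx && !st.2.isEmpty then (st.1 ++ [st.2], [idx])
      else (st.1, st.2 ++ [idx]) := by
  by_cases h : (pvIsUserAt messages idx && !st.2.isEmpty) = true <;> simp [pvStepA, h]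

-- A's fold with nonempty current equals pvGAux, carrying finished groups in front
theorem pvFoldA (messages : List (List (String × String))) (n : Int) :
    ∀ (k : Nat) (a : Int) (groups : List (List Int)) (cur : List Int),
    (n - a).toNat ≤ k → cur ≠ [] →
    pvFin ((PySem.List.pyRange a n 1).foldl (pvStepA messages) (groups, cur)) =
    groups ++ pvGAux (pvIsUserAt messages) cur a n := by
  intro k
  induction k with
  | zero =>
    intro a groups cur hk hcur
    rw [PySem.List.pyRange_one_eq_nil (by omega), pvGAux, dif_neg (by omega : ¬ a < n)]
    simp [pvFin, hcur]
  | succ k ih =>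
    intro a groups cur hk hcur
    by_cases h : a < n
    · rw [PySem.List.pyRange_one_cons h, pvGAux, dif_pos h]
      simp only [List.foldl_cons, pvStepA_eq]
      have hce : cur.isEmpty = false := by simp [hcur]
      by_cases hp : pvIsUserAt messages a = true
      · have hcond : (pvIsUserAt messages a && !cur.isEmpty) = true := by simp [hp, hce]
        rw [hcond, if_pos rfl, if_pos hp]
        rw [ih (a + 1) (groups ++ [cur]) [a] (by omega) (by simp)]
        simp
      · have hcond : (pvIsUserAt messages a && !cur.isEmpty) = false := by simp [hp]
        rw [hcond, if_neg (by simp), if_neg hp]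
        exact ih (a + 1) groups (cur ++ [a]) (by omega) (by simp)
    · rw [PySem.List.pyRange_one_eq_nil (by omega), pvGAux, dif_neg h]
      simp [pvFin, hcur]

-- B's zip-of-boundaries equals pvGAux with the range so far as the current group
theorem pvFoldB (p : Int → Bool) (n : Int) :
    ∀ (k : Nat) (a s : Int), (n - a).toNat ≤ k → s < a → a ≤ n →
    (((s :: (PySem.List.pyRange a n 1).filter p).zip
        ((s :: (PySem.List.pyRange a n 1).filter p).tail ++ [n])).map
      (fun ab => PySem.List.pyRange ab.1 ab.2 1)) =
    pvGAux p (PySem.List.pyRange s a 1) a n := by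
  intro k
  induction k with
  | zero =>
    intro a s hk hs han
    have hna : a = n := by omega
    subst hna
    rw [PySem.List.pyRange_one_eq_nil le_rfl, pvGAux, dif_neg (lt_irrefl a)]
    simp
  | succ k ih =>
    intro a s hk hs han
    by_cases h : a < n
    · rw [PySem.List.pyRange_one_cons h, pvGAux, dif_pos h]
      by_cases hp : p a = true
      · rw [List.filter_cons_of_pos hp, if_pos hp]
        have := ih (a + 1) a (by omega) (by omega) (by omega)
        rw [PySem.List.pyRange_one_singleton] at this
        simp only [List.tail_cons] at this
        simp only [List.zip_cons_cons, List.tail_cons, List.map_cons, List.cons_append]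
        rw [this]
      · rw [List.filter_cons_of_neg (by simp [hp]), if_neg hp]
        rw [← PySem.List.pyRange_one_succ_right (by omega : s ≤ a)]
        exact ih (a + 1) s (by omega) (by omega) (by omega)
    · rw [PySem.List.pyRange_one_eq_nil (by omega), pvGAux, dif_neg h]
      have hna : a = n := by omega
      subst hna
      simp

-- ===== VERDICT (by name: the statement is the Claim_ definition above) =====
theorem group_exchanges_py_spec : Claim_equal_group_exchanges_py := by
  intro messages start_idx _ _
  unfold Spec_group_exchanges_py
  simp only [group_exchanges_py, group_exchanges_py_alt]
  change pvFin _ = _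
  by_cases h : start_idx < (messages.length : Int)
  · rw [if_neg (by omega : ¬ start_idx ≥ (messages.length : Int))]
    rw [PySem.List.pyRange_one_cons h]
    simp only [List.foldl_cons]
    rw [show pvStepA messages ([], []) start_idx = ([], [start_idx]) from by simp [pvStepA]]
    rw [pvFoldA messages (messages.length : Int) ((messages.length : Int) - (start_idx + 1)).toNat
      (start_idx + 1) [] [start_idx] le_rfl (by simp)]
    have hB := pvFoldB (pvIsUserAt messages) (messages.length : Int)
      (((messages.length : Int)) - (start_idx + 1)).toNat (start_idx + 1) start_idx le_rfl
      (by omega) (by omega)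
    rw [PySem.List.pyRange_one_singleton] at hB
    rw [hB]
    simp
  · rw [if_pos (by omega : start_idx ≥ (messages.length : Int))]
    rw [PySem.List.pyRange_one_eq_nil (by omega)]
    simp [pvFin]
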